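-- pv_equiv track=rewrite | github.com/tonylearn09/emobot_server | emobot.py | str_sep
-- ===== SOURCE A (Python) =====
-- def str_sep(script):
--     final_conversation_list = []
--     cur_str = ''
--     for line in script.split('\n'):
--         #letter_line = filter(str.isalpha, line)
--         #if isupper(letter_line):
--         if line.isupper():
--             if cur_str:
--                 final_conversation_list.append(cur_str)
--                 cur_str = ''
--         else:
--             cur_str += line
--     if cur_str:
--         final_conversation_list.append(cur_str)
--
--     return final_conversation_list
-- ===== SOURCE B (Python) =====
-- def str_sep(script):
--     # Partition the lines into maximal runs of non-uppercase lines (uppercase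
--     # lines act as separators), join each run and keep the non-empty chunks.
--     lines = script.split('\n')
--     out = []
--     i, n = 0, len(lines)
--     while i < n:
--         if lines[i].isupper():
--             i += 1
--             continue
--         j = i + 1
--         while j < n and not lines[j].isupper():
--             j += 1
--         chunk = ''.join(lines[i:j])
--         if chunk:
--             out.append(chunk)
--         i = j
--     return out
-- ===== Notes on version B (the rewrite author's own statement) =====
-- stated objective: alternative
-- what changed: A's single accumulator-with-flush loop is replaced by a run-partition pass: uppercase lines act as separators, each maximal run of non-uppercase lines is joined in one step and non-empty chunks are kept.
import Mathlib
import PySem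

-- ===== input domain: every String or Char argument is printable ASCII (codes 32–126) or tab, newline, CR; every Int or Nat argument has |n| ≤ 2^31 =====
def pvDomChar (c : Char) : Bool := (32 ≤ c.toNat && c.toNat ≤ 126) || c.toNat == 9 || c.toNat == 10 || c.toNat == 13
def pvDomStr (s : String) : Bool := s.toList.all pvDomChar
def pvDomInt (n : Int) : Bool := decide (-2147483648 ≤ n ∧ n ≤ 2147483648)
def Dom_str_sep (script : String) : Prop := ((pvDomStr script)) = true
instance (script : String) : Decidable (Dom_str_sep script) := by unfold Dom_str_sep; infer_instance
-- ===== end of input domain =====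

-- B replaces A's accumulator-with-flush loop by a run-partition pass (uppercase
-- lines are separators; each maximal non-uppercase run is joined and kept if
-- non-empty); same cost, different decomposition.

-- Python's str.isupper(): at least one cased character and no lowercase one.
-- Exact on the printable-ASCII domain, where the cased characters are exactly
-- the letters. (Shared helper: both Pythons call line.isupper().)
def pyStrIsupper (s : String) : Bool :=
  s.toList.any PySem.Chars.isalpha && s.toList.all (fun c => !PySem.Chars.islower c)

-- ===== PORT A =====
def strSepStep (st : List String × String) (line : String) : List String × String :=
  if pyStrIsupper line then
    if st.2 ≠ "" then (st.1 ++ [st.2], "") else st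
  else (st.1, st.2 ++ line)

def str_sep (script : String) : List String :=
  let st := ((PySem.Str.split? script "\n").getD []).foldl strSepStep ([], "")
  if st.2 ≠ "" then st.1 ++ [st.2] else st.1

-- ===== PORT B =====
-- Source B's outer while loop: skip an uppercase line; otherwise the inner while
-- finds the end of the current non-uppercase run (takeWhile/dropWhile), the run
-- is joined and appended if non-empty, and the loop resumes after the run.
def strSepRuns : List String → List String
  | [] => []
  | l :: ls =>
    if pyStrIsupper l then strSepRuns ls
    else
      let chunk := PySem.Str.join "" (l :: ls.takeWhile (fun x => !pyStrIsupper x))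
      (if chunk ≠ "" then [chunk] else []) ++
        strSepRuns (ls.dropWhile (fun x => !pyStrIsupper x))
termination_by ls => ls.length
decreasing_by
  all_goals simp only [List.length_cons]
  · omega
  · have := List.length_dropWhile_le (fun x => !pyStrIsupper x) ls
    omega

def str_sep_alt (script : String) : List String :=
  strSepRuns ((PySem.Str.split? script "\n").getD [])

-- ===== PRECONDITION & SPEC =====
def Spec_str_sep (script : String) (out : List String) : Prop := out = str_sep_alt script
instance (script : String) (out : List String) : Decidable (Spec_str_sep script out) := by unfold Spec_str_sep; infer_instance

-- ===== CLAIM (what is proved, stated in full; the proofs are below) =====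
def Claim_equal_str_sep : Prop := ∀ (script : String), Dom_str_sep script → Spec_str_sep script (str_sep script)

-- ===== LEMMAS AND PROOFS =====

-- A's loop on a remaining line list, as a structural recursion on the lines
-- (accumulator dropped: 'emit cur ls' is what A appends after state cur).
def emit (cur : String) : List String → List String
  | [] => if cur ≠ "" then [cur] else []
  | l :: ls =>
    if pyStrIsupper l then (if cur ≠ "" then [cur] else []) ++ emit "" ls
    else emit (cur ++ l) ls

theorem join_empty_cons (l : String) (ls : List String) :
    PySem.Str.join "" (l :: ls) = l ++ PySem.Str.join "" ls := by
  have h : ∀ (x : List Char) (xs : List (List Char)),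
      ([] : List Char).intercalate (x :: xs) = x ++ ([] : List Char).intercalate xs := by
    intro x xs; induction xs <;> simp_all [List.intercalate]
  simp [PySem.Str.join, PySem.Chars.join, h, String.ofList_append]

-- A's foldl-with-final-flush equals 'acc ++ emit cur'.
theorem foldl_step_eq_emit (ls : List String) : ∀ (acc : List String) (cur : String),
    (let st := ls.foldl strSepStep (acc, cur);
      if st.2 ≠ "" then st.1 ++ [st.2] else st.1) = acc ++ emit cur ls := by
  induction ls with
  | nil => intro acc cur; by_cases h : cur = "" <;> simp [emit, h]
  | cons l ls ih =>
    intro acc cur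
    by_cases hu : pyStrIsupper l
    · by_cases hc : cur = "" <;>
        simp [strSepStep, emit, hu, hc, ih, List.append_assoc]
    · simp [strSepStep, emit, hu, ih]

-- 'emit cur' emits cur glued onto the first non-uppercase run, then B's runs.
theorem emit_eq_runs (n : Nat) : ∀ (ls : List String), ls.length ≤ n →
    (∀ cur : String,
      emit cur ls =
        (let c := cur ++ PySem.Str.join "" (ls.takeWhile (fun x => !pyStrIsupper x));
          if c ≠ "" then [c] else []) ++
        strSepRuns (ls.dropWhile (fun x => !pyStrIsupper x))) ∧
    emit "" ls = strSepRuns ls := by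
  induction n with
  | zero =>
    intro ls hls
    have : ls = [] := List.eq_nil_of_length_eq_zero (Nat.le_zero.mp hls)
    subst this
    constructor
    · intro cur
      by_cases h : cur = "" <;> simp [emit, strSepRuns, PySem.Str.join,
        PySem.Chars.join, List.intercalate, h, String.append_empty]
    · simp [emit, strSepRuns]
  | succ n ih =>
    intro ls hls
    match ls with
    | [] =>
      constructor
      · intro cur
        by_cases h : cur = "" <;> simp [emit, strSepRuns, PySem.Str.join,
          PySem.Chars.join, List.intercalate, h, String.append_empty]
      · simp [emit, strSepRuns]
    | l :: ls =>
      have hlen : ls.length ≤ n := Nat.le_of_succ_le_succ hls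
      have part1 : ∀ cur : String,
          emit cur (l :: ls) =
            (let c := cur ++ PySem.Str.join "" ((l :: ls).takeWhile (fun x => !pyStrIsupper x));
              if c ≠ "" then [c] else []) ++
            strSepRuns ((l :: ls).dropWhile (fun x => !pyStrIsupper x)) := by
        intro cur
        by_cases hu : pyStrIsupper l
        · have h2 := (ih ls hlen).2
          by_cases hc : cur = "" <;>
            simp [emit, hu, hc, List.takeWhile, List.dropWhile, strSepRuns,
              PySem.Str.join, PySem.Chars.join, List.intercalate,
              String.append_empty, h2]
        · have h1 := (ih ls hlen).1 (cur ++ l)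
          simp only [emit, hu, if_neg, Bool.not_eq_true] at h1 ⊢
          rw [h1]
          simp [List.takeWhile, List.dropWhile, hu, join_empty_cons,
            String.append_assoc]
      refine ⟨part1, ?_⟩
      by_cases hu : pyStrIsupper l
      · have h2 := (ih ls hlen).2
        simp [emit, strSepRuns, hu, h2]
      · rw [part1 ""]
        simp [strSepRuns, hu, String.empty_append]

theorem str_sep_eq (script : String) : str_sep script = str_sep_alt script := by
  unfold str_sep str_sep_alt
  rw [foldl_step_eq_emit]
  simp [(emit_eq_runs ((PySem.Str.split? script "\n").getD []).length _ (le_refl _)).2]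

-- ===== VERDICT (by name: the statement is the Claim_ definition above) =====
theorem str_sep_spec : Claim_equal_str_sep := by
  intro script _
  unfold Spec_str_sep
  exact str_sep_eq script
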